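-- pv_equiv track=rewrite | github.com/JongP/Problem-Solving | binarySearch/646Maximum Length of Pair Chain.py | myBisect
-- ===== SOURCE A (Python) =====
-- def myBisect(pairs,idx):
--     le,ri=0,idx-1
--     res=-1
--     start=pairs[idx][0]
--
--     while le<=ri:
--         mid=(le+ri)//2
--
--         if pairs[mid][1]<start:
--             res=mid
--             le=mid+1
--         else:
--             ri=mid-1
--
--     return res
-- ===== SOURCE B (Python) =====
-- def myBisect(pairs, idx):
--     start = pairs[idx][0]
--     # precompute the comparison outcomes for the whole searched prefix once
--     flags = [pairs[i][1] < start for i in range(idx)]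
--
--     # divide and conquer on the flag list itself: split at the midpoint,
--     # keep the rightmost True found, carrying the absolute base offset
--     def rec(bs, base):
--         if not bs:
--             return -1
--         m = (len(bs) - 1) // 2
--         if bs[m]:
--             r = rec(bs[m + 1:], base + m + 1)
--             return base + m if r == -1 else r
--         return rec(bs[:m], base)
--
--     return rec(flags, 0)
-- ===== Notes on version B (the rewrite author's own statement) =====
-- stated objective: alternative
-- what changed: Replaces A's imperative binary-search loop over integer indices (mutable le/ri/res) by a two-stage algorithm: first materialise the boolean comparison outcomes for the whole prefix pairs[0:idx] in one pass, then divide-and-conquer directly on that list by slicing it at the midpoint, threading a base offset and taking the rightmost True from the right half.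
-- outside the precondition, e.g. on myBisect([[9], [5, 2], [5, 2], [7, 8]], 3): A returns 2, B raises IndexError
import Mathlib
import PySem

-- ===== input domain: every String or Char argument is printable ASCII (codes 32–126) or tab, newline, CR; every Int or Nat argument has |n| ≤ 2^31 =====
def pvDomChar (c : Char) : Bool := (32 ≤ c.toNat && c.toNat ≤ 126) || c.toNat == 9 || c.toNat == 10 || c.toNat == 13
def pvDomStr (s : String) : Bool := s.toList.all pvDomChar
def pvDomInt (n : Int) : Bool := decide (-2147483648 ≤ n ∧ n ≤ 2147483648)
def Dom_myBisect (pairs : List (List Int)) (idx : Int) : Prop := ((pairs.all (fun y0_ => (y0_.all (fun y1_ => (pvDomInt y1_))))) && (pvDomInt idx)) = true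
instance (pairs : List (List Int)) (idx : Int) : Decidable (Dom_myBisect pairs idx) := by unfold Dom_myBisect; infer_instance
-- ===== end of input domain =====

-- B replaces A's index-based binary-search loop by a two-stage algorithm: precompute the
-- boolean comparison outcomes for the prefix once, then divide-and-conquer on that list by
-- slicing it at the midpoint; objective: alternative decomposition, same result.

-- ===== PORT A =====
-- A's while loop, state (le, ri, res); fuel is only a totality guard: the interval
-- [le, ri] shrinks each iteration, so fuel = initial interval length is never exhausted.
-- pairs[mid][1] is a pyGet?; the .getD 0 fallback is unreachable under Pre_
-- (Python raises IndexError there).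
def myBisectLoop (pairs : List (List Int)) (start : Int) : Nat → Int → Int → Int → Int
  | 0, _, _, res => res
  | fuel + 1, le, ri, res =>
    if le ≤ ri then
      let mid := PySem.Int.floordiv (le + ri) 2
      if ((PySem.List.pyGet? pairs mid).bind (fun l => PySem.List.pyGet? l 1)).getD 0 < start then
        myBisectLoop pairs start fuel (mid + 1) ri mid
      else
        myBisectLoop pairs start fuel le (mid - 1) res
    else res

def myBisect (pairs : List (List Int)) (idx : Int) : Int :=
  -- start = pairs[idx][0]; .getD 0 unreachable under Pre_ (Python raises IndexError there)
  let start := ((PySem.List.pyGet? pairs idx).bind (fun l => PySem.List.pyGet? l 0)).getD 0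
  myBisectLoop pairs start idx.toNat 0 (idx - 1) (-1)

-- ===== PORT B =====
-- Source B's rec(bs, base): empty list → -1; split the flag list at its midpoint (Python
-- slices bs[:m] / bs[m+1:] become take/drop, which is exact for 0 ≤ m ≤ len), keep the
-- rightmost True of the right half, else recurse into the left slice.
def srchFlags (bs : List Bool) (base : Int) : Int :=
  if h : bs.isEmpty then -1
  else
    let m := (bs.length - 1) / 2
    if bs.getD m false then  -- bs[m]; exact: 0 ≤ m < bs.length here
      let r := srchFlags (bs.drop (m + 1)) (base + (m : Int) + 1)
      if r = -1 then base + (m : Int) else r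
    else srchFlags (bs.take m) base
termination_by bs.length
decreasing_by
  · simp only [List.length_drop]
    have : bs.length ≠ 0 := by simpa [List.isEmpty_iff_length_eq_zero] using h
    omega
  · simp only [List.length_take]
    have : bs.length ≠ 0 := by simpa [List.isEmpty_iff_length_eq_zero] using h
    omega

def myBisect_alt (pairs : List (List Int)) (idx : Int) : Int :=
  -- start = pairs[idx][0]; .getD 0 unreachable under Pre_ (Python raises IndexError there)
  let start := ((PySem.List.pyGet? pairs idx).bind (fun l => PySem.List.pyGet? l 0)).getD 0
  -- flags = [pairs[i][1] < start for i in range(idx)]: range(idx) is empty for idx ≤ 0 and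
  -- (under Pre_, where idx < len pairs) enumerates exactly the prefix pairs.take idx.toNat;
  -- row[1] is a pyGet? whose .getD 0 fallback is unreachable under Pre_
  let flags := (pairs.take idx.toNat).map
    (fun row => decide ((PySem.List.pyGet? row 1).getD 0 < start))
  srchFlags flags 0

-- ===== PRECONDITION & SPEC =====
-- Pre_ excludes inputs where pairs[idx][0] raises IndexError, and (slightly wider than
-- A's raises, see cites) inputs where some list among pairs[0:idx] has fewer than 2
-- elements: B's precomputation reads every pairs[i][1] of the prefix and raises there,
-- while whether A raises depends on which midpoints its probe sequence happens to visit.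
def Pre_myBisect (pairs : List (List Int)) (idx : Int) : Prop :=
  ((PySem.List.pyGet? pairs idx).bind (fun l => PySem.List.pyGet? l 0)) ≠ none ∧
  ∀ l ∈ pairs.take idx.toNat, 2 ≤ l.length
instance (pairs : List (List Int)) (idx : Int) : Decidable (Pre_myBisect pairs idx) := by
  unfold Pre_myBisect; infer_instance

def pvWitness_myBisect : List (List Int) × Int := ([[1, 2], [3, 4], [5, 6]], 2)

def Spec_myBisect (pairs : List (List Int)) (idx : Int) (out : Int) : Prop := out = myBisect_alt pairs idx
instance (pairs : List (List Int)) (idx : Int) (out : Int) : Decidable (Spec_myBisect pairs idx out) := by unfold Spec_myBisect; infer_instance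

-- ===== CLAIM (what is proved, stated in full; the proofs are below) =====
def Claim_equal_myBisect : Prop := ∀ (pairs : List (List Int)) (idx : Int), Dom_myBisect pairs idx → Pre_myBisect pairs idx → Spec_myBisect pairs idx (myBisect pairs idx)

-- ===== LEMMAS AND PROOFS =====

-- the contiguous segment of flag values f lo, f (lo+1), …, f (lo+n-1)
def flagsSeg (f : Nat → Bool) (lo n : Nat) : List Bool :=
  (List.range n).map (fun j => f (lo + j))

theorem flagsSeg_length (f : Nat → Bool) (lo n : Nat) : (flagsSeg f lo n).length = n := by
  simp [flagsSeg]

theorem flagsSeg_getD (f : Nat → Bool) (lo n m : Nat) (h : m < n) :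
    (flagsSeg f lo n).getD m false = f (lo + m) := by
  simp [flagsSeg, List.getD_eq_getElem?_getD, h]

theorem flagsSeg_drop (f : Nat → Bool) (lo n k : Nat) :
    (flagsSeg f lo n).drop k = flagsSeg f (lo + k) (n - k) := by
  apply List.ext_getElem
  · simp [flagsSeg]
  · intro i h1 h2
    simp only [flagsSeg, List.getElem_drop, List.getElem_map, List.getElem_range]
    congr 1
    omega

theorem flagsSeg_take (f : Nat → Bool) (lo n k : Nat) (h : k ≤ n) :
    (flagsSeg f lo n).take k = flagsSeg f lo k := by
  apply List.ext_getElem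
  · simp [flagsSeg]; omega
  · intro i h1 h2
    simp [flagsSeg]

theorem loop_eq_srch (pairs : List (List Int)) (start : Int) (f : Nat → Bool)
    (hf : ∀ i : Nat,
      f i = decide ((((PySem.List.pyGet? pairs (i : Int)).bind
        (fun l => PySem.List.pyGet? l 1)).getD 0) < start)) :
    ∀ (fuel n lo : Nat) (res : Int), n ≤ fuel →
      myBisectLoop pairs start fuel (lo : Int) ((lo : Int) + (n : Int) - 1) res =
        (if srchFlags (flagsSeg f lo n) (lo : Int) = -1 then res
         else srchFlags (flagsSeg f lo n) (lo : Int)) := by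
  intro fuel
  induction fuel with
  | zero =>
    intro n lo res hn
    have : n = 0 := by omega
    subst this
    simp [myBisectLoop, flagsSeg, srchFlags]
  | succ fuel ih =>
    intro n lo res hn
    match n with
    | 0 => simp [myBisectLoop, flagsSeg, srchFlags]
    | n + 1 =>
      rw [myBisectLoop, srchFlags]
      have hne : ¬ (flagsSeg f lo (n + 1)).isEmpty := by
        simp only [List.isEmpty_iff_length_eq_zero, flagsSeg_length]
        omega
      rw [dif_neg hne]
      simp only [flagsSeg_length, Nat.cast_add, Nat.cast_one, Nat.add_sub_cancel]
      rw [if_pos (show (lo : Int) ≤ (lo : Int) + ((n : Int) + 1) - 1 by omega)]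
      set m : Nat := n / 2 with hm
      have hmid : PySem.Int.floordiv ((lo : Int) + ((lo : Int) + ((n : Int) + 1) - 1)) 2
          = (lo : Int) + (m : Int) := by
        rw [PySem.Int.floordiv_eq_ediv_of_pos (by omega)]
        omega
      have hcond : ((PySem.List.pyGet? pairs ((lo : Int) + (m : Int))).bind
          (fun l => PySem.List.pyGet? l 1)).getD 0 < start ↔ f (lo + m) = true := by
        rw [hf (lo + m)]
        push_cast
        simp
      have hgetD : (flagsSeg f lo (n + 1)).getD m false = f (lo + m) := by
        exact flagsSeg_getD f lo (n + 1) m (by omega)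
      simp only [hgetD, hmid]
      by_cases hc : f (lo + m) = true
      · rw [if_pos (hcond.mpr hc), if_pos hc]
        have hdrop : (flagsSeg f lo (n + 1)).drop (m + 1) = flagsSeg f (lo + (m + 1)) (n - m) := by
          rw [flagsSeg_drop]
          congr 1
          omega
        have := ih (n - m) (lo + (m + 1)) ((lo : Int) + (m : Int)) (by omega)
        rw [show (lo : Int) + (m : Int) + 1 = ((lo + (m + 1) : Nat) : Int) by push_cast; ring,
            show (lo : Int) + ((n : Int) + 1) - 1 = ((lo + (m + 1) : Nat) : Int) + ((n - m : Nat) : Int) - 1 by push_cast; omega,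
            hdrop, this]
        set r := srchFlags (flagsSeg f (lo + (m + 1)) (n - m)) ((lo + (m + 1) : Nat) : Int) with hr
        by_cases h1 : r = -1
        · simp only [if_pos h1]
          rw [if_neg (show ¬((lo : Int) + (m : Int) = -1) by omega)]
        · simp only [if_neg h1]
      · rw [if_neg (fun h => hc (hcond.mp h)), if_neg hc]
        have htake : (flagsSeg f lo (n + 1)).take m = flagsSeg f lo m :=
          flagsSeg_take f lo (n + 1) m (by omega)
        have := ih m lo res (by omega)
        rw [show (lo : Int) + (m : Int) - 1 = (lo : Int) + ((m : Nat) : Int) - 1 by push_cast; ring,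
            htake]
        exact this

theorem flags_eq_seg (pairs : List (List Int)) (start : Int) (n : Nat)
    (hn : n ≤ pairs.length) :
    (pairs.take n).map (fun row => decide ((PySem.List.pyGet? row 1).getD 0 < start)) =
      flagsSeg (fun i => decide ((((PySem.List.pyGet? pairs (i : Int)).bind
        (fun l => PySem.List.pyGet? l 1)).getD 0) < start)) 0 n := by
  apply List.ext_getElem
  · simp [flagsSeg_length]; omega
  · intro i h1 h2
    have hi : i < pairs.length := by
      simp [List.length_take] at h1; omega
    simp [flagsSeg, PySem.List.pyGet?_natCast, hi]

-- ===== VERDICT (by name: the statement is the Claim_ definition above) =====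
theorem myBisect_spec : Claim_equal_myBisect := by
  intro pairs idx _hdom hpre
  unfold Spec_myBisect myBisect myBisect_alt
  obtain ⟨h1, _h2⟩ := hpre
  dsimp only
  by_cases hidx : 0 ≤ idx
  · have hnone : PySem.List.pyGet? pairs idx ≠ none := by
      intro h; exact h1 (by simp [h])
    have hlt : idx < pairs.length := by
      have := (PySem.List.pyGet?_eq_none_iff (xs := pairs) (i := idx)).not_left.mp hnone
      unfold PySem.Raise.InRange at this
      omega
    rw [flags_eq_seg pairs _ idx.toNat (by omega)]
    have hloop := loop_eq_srch pairs
      (((PySem.List.pyGet? pairs idx).bind (fun l => PySem.List.pyGet? l 0)).getD 0)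
      (fun i => decide ((((PySem.List.pyGet? pairs (i : Int)).bind
        (fun l => PySem.List.pyGet? l 1)).getD 0) <
          ((PySem.List.pyGet? pairs idx).bind (fun l => PySem.List.pyGet? l 0)).getD 0))
      (fun i => rfl) idx.toNat idx.toNat 0 (-1) (le_refl _)
    simp only [Nat.cast_zero, zero_add] at hloop
    rw [Int.toNat_of_nonneg hidx] at hloop
    rw [hloop]
    split <;> simp_all
  · have h0 : idx.toNat = 0 := by omega
    rw [h0]
    simp [myBisectLoop, srchFlags]
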